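-- pv_equiv track=rewrite | github.com/candytale55/All-Python-Code-Snippets-2020 | Learn_Python_3_Code_Challenges-Dictionaries/count_first_letter.py | count_first_letter
-- ===== SOURCE A (Python) =====
-- def count_first_letter(names):
--   new_dict = {}
--   for key,values in names.items():
--     if key[0] not in new_dict:
--       new_dict[key[0]] = len(values)
--     else:
--       new_dict[key[0]]+= len(values)
--   return new_dict
-- ===== SOURCE B (Python) =====
-- def count_first_letter(names):
--   items = list(names.items())
--   letters = []
--   for k, _v in items:
--     if k[0] not in letters:
--       letters.append(k[0])
--   return {c: sum(len(v) for k, v in items if k[0] == c) for c in letters}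
-- ===== Notes on version B (the rewrite author's own statement) =====
-- stated objective: alternative
-- what changed: B replaces A's single accumulate-into-dict pass by a two-phase scheme: first collect the distinct first letters in order of first appearance, then build the result with one per-letter summation pass over the items.
import Mathlib
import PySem

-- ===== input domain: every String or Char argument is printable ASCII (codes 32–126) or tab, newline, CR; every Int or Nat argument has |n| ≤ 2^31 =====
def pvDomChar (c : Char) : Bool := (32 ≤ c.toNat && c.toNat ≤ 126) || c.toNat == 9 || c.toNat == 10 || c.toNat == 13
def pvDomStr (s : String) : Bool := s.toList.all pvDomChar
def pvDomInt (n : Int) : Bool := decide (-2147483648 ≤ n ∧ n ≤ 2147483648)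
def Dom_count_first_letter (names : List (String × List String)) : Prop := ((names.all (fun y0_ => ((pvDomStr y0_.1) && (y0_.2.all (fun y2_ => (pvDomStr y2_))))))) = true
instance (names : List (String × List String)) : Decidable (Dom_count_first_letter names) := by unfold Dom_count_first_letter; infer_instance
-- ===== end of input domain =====

-- B replaces A's single accumulate-into-dict pass by two phases (collect distinct first
-- letters in order of first appearance, then one per-letter summation pass); alternative
-- decomposition, not claimed faster. Equivalence is proved on inputs whose keys are nonempty
-- (Python A raises IndexError on an empty-string key).

-- ===== PORT A =====
-- one loop step of A: key[0] (a 1-char string), then insert-or-+= into the dict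
def cflStepA (d : PySem.Dict String Int) (kv : String × List String) : PySem.Dict String Int :=
  match PySem.Str.pyGet? kv.1 0 with
  | none => d          -- Python raises IndexError here; such inputs are excluded by Pre_
  | some ch =>
    if d.contains (String.ofList [ch]) = false then
      d.insert (String.ofList [ch]) ((kv.2.length : Int))
    else
      d.modify (String.ofList [ch]) 0 (· + (kv.2.length : Int))

def count_first_letter (names : List (String × List String)) : List (String × Int) :=
  (names.foldl cflStepA PySem.Dict.empty).items

-- ===== PORT B =====
-- B phase 1: the distinct first letters, in order of first appearance
def cflLettersStep (ls : List String) (kv : String × List String) : List String :=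
  match PySem.Str.pyGet? kv.1 0 with
  | none => ls         -- Python raises IndexError here; excluded by Pre_
  | some ch => if ls.contains (String.ofList [ch]) then ls else ls ++ [String.ofList [ch]]

def cflLetters (names : List (String × List String)) : List String :=
  names.foldl cflLettersStep []

-- B phase 2: sum(len(v) for k, v in items if k[0] == c)
def cflSumStep (c : String) (acc : Int) (kv : String × List String) : Int :=
  match PySem.Str.pyGet? kv.1 0 with
  | none => acc        -- Python raises IndexError here; excluded by Pre_
  | some ch => if String.ofList [ch] == c then acc + (kv.2.length : Int) else acc

def cflSum (names : List (String × List String)) (c : String) : Int :=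
  names.foldl (cflSumStep c) 0

def count_first_letter_alt (names : List (String × List String)) : List (String × Int) :=
  (cflLetters names).map (fun c => (c, cflSum names c))

-- ===== PRECONDITION & SPEC =====
-- Pre_ excludes exactly the inputs with an empty-string key, on which Python A (key[0])
-- raises IndexError (B raises there too).
def Pre_count_first_letter (names : List (String × List String)) : Prop :=
  (names.all (fun kv => !(kv.1 == ""))) = true
instance (names : List (String × List String)) : Decidable (Pre_count_first_letter names) := by
  unfold Pre_count_first_letter; infer_instance

def pvWitness_count_first_letter : (List (String × List String)) :=
  [("alice", ["x", "yz"]), ("bob", []), ("amy", ["q"])]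

def Spec_count_first_letter (names : List (String × List String)) (out : List (String × Int)) : Prop := out = count_first_letter_alt names
instance (names : List (String × List String)) (out : List (String × Int)) : Decidable (Spec_count_first_letter names out) := by unfold Spec_count_first_letter; infer_instance

-- ===== CLAIM (what is proved, stated in full; the proofs are below) =====
def Claim_equal_count_first_letter : Prop := ∀ (names : List (String × List String)), Dom_count_first_letter names → Pre_count_first_letter names → Spec_count_first_letter names (count_first_letter names)

-- ===== LEMMAS AND PROOFS =====

-- A's dict keys evolve exactly like B's letters list (both started anywhere)
theorem cfl_keys (names : List (String × List String)) :
    ∀ (d : PySem.Dict String Int),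
      (names.foldl cflStepA d).keys = names.foldl cflLettersStep d.keys := by
  induction names with
  | nil => intro d; simp
  | cons kv rest ih =>
    intro d
    simp only [List.foldl_cons]
    have hstep : (cflStepA d kv).keys = cflLettersStep d.keys kv := by
      unfold cflStepA cflLettersStep
      cases h : PySem.Str.pyGet? kv.1 0 with
      | none => rfl
      | some ch =>
        by_cases hc : d.contains (String.ofList [ch]) = true
        · have hmem : (String.ofList [ch]) ∈ d.keys :=
            (PySem.Dict.contains_iff_mem_keys d _).mp hc
          simp [hc, PySem.Dict.keys_modify,
            PySem.Dict.keys_insert_of_contains d _ hc, hmem]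
        · have hcf : d.contains (String.ofList [ch]) = false := by
            cases hcc : d.contains (String.ofList [ch]) <;> simp_all
          have hnm : (String.ofList [ch]) ∉ d.keys := by
            intro hmem
            exact absurd ((PySem.Dict.contains_iff_mem_keys d _).mpr hmem) (by simp [hcf])
          simp [hcf, PySem.Dict.keys_insert_of_not_contains d _ hcf, hnm]
    rw [← hstep]
    exact ih _

-- B's letters fold keeps the list duplicate-free
theorem cfl_letters_nodup (names : List (String × List String)) :
    ∀ (ls : List String), ls.Nodup → (names.foldl cflLettersStep ls).Nodup := by
  induction names with
  | nil => intro ls h; simpa using h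
  | cons kv rest ih =>
    intro ls h
    simp only [List.foldl_cons]
    apply ih
    unfold cflLettersStep
    cases hg : PySem.Str.pyGet? kv.1 0 with
    | none => exact h
    | some ch =>
      by_cases hm : (String.ofList [ch]) ∈ ls
      · simpa [hm] using h
      · have : ¬ ls.contains (String.ofList [ch]) = true := by
          simpa using hm
        simp only [this, if_false, Bool.false_eq_true]
        exact List.Nodup.append h (List.nodup_singleton _) (by simpa using hm)

-- B's sum fold shifts its accumulator additively
theorem cfl_sum_shift (c : String) (names : List (String × List String)) :
    ∀ (a : Int), names.foldl (cflSumStep c) a = a + names.foldl (cflSumStep c) 0 := by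
  induction names with
  | nil => intro a; simp
  | cons kv rest ih =>
    intro a
    simp only [List.foldl_cons]
    rw [ih (cflSumStep c a kv), ih (cflSumStep c 0 kv)]
    have : cflSumStep c a kv = a + cflSumStep c 0 kv := by
      unfold cflSumStep
      cases PySem.Str.pyGet? kv.1 0 with
      | none => simp
      | some ch =>
        by_cases h : (String.ofList [ch] == c) = true
        · simp only [h, if_true]; ring
        · simp [h]
    rw [this]; ring

-- every lookup in A's dict after the fold is the starting value plus B's per-letter sum
theorem cfl_getD (names : List (String × List String)) :
    ∀ (d : PySem.Dict String Int) (s : String),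
      (names.foldl cflStepA d).getD s 0 = d.getD s 0 + cflSum names s := by
  induction names with
  | nil => intro d s; simp [cflSum]
  | cons kv rest ih =>
    intro d s
    simp only [List.foldl_cons]
    have hsum : cflSum (kv :: rest) s = cflSumStep s 0 kv + cflSum rest s := by
      unfold cflSum
      simp only [List.foldl_cons]
      exact cfl_sum_shift s rest (cflSumStep s 0 kv)
    rw [ih (cflStepA d kv) s, hsum]
    have hstep : (cflStepA d kv).getD s 0 = d.getD s 0 + cflSumStep s 0 kv := by
      simp only [cflStepA, cflSumStep, PySem.Str.pyGet?]
      cases hg : PySem.Chars.pyGet? kv.1.toList 0 with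
      | none => simp
      | some ch =>
        by_cases hc : d.contains (String.ofList [ch]) = true
        · by_cases hs : s = String.ofList [ch]
          · subst hs
            simp [hc]
          · have hne : ¬ (String.ofList [ch] == s) = true := by
              simp only [beq_iff_eq]; exact fun h => hs h.symm
            simp [hc, hs, hne, PySem.Dict.getD_modify]
        · have hcf : d.contains (String.ofList [ch]) = false := by
            cases hcc : d.contains (String.ofList [ch]) <;> simp_all
          have h0 : d.getD (String.ofList [ch]) 0 = 0 :=
            PySem.Dict.getD_of_not_contains d 0 hcf
          by_cases hs : s = String.ofList [ch]
          · subst hs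
            simp [hcf, h0]
          · have hne : ¬ (String.ofList [ch] == s) = true := by
              simp only [beq_iff_eq]; exact fun h => hs h.symm
            simp [hcf, hs, hne, PySem.Dict.getD_insert]
    rw [hstep]; ring

-- ===== VERDICT (by name: the statement is the Claim_ definition above) =====
theorem count_first_letter_spec : Claim_equal_count_first_letter := by
  unfold Claim_equal_count_first_letter
  intro names _hdom _hpre
  unfold Spec_count_first_letter count_first_letter count_first_letter_alt
  have hkeys : (names.foldl cflStepA PySem.Dict.empty).keys = cflLetters names := by
    rw [cfl_keys names PySem.Dict.empty, PySem.Dict.keys_empty]; rfl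
  have hnd : (names.foldl cflStepA PySem.Dict.empty).keys.Nodup := by
    rw [hkeys]; exact cfl_letters_nodup names [] List.nodup_nil
  rw [PySem.Dict.items_eq_map_keys _ hnd 0, hkeys]
  apply List.map_congr_left
  intro c _hc
  have := cfl_getD names PySem.Dict.empty c
  simp only [PySem.Dict.getD_empty] at this
  rw [this]
  simp
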